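-- pv_equiv track=rewrite | github.com/zabooh/net_10base_t1s | apps/tcpip_iperf_lan865x/firmware/tcpip_iperf_lan865x.X/find_exception.py | decode_cfsr
-- ===== SOURCE A (Python) =====
-- UFSR_BITS = [    # CFSR bits 16-31
--     (16, "UNDEFINSTR (undefined instruction)"),
--     (17, "INVSTATE (invalid EPSR.T or invalid IT)"),
--     (18, "INVPC (invalid PC load by EXC_RETURN)"),
--     (19, "NOCP (coprocessor disabled / not present)"),
--     (24, "UNALIGNED (unaligned access)"),
--     (25, "DIVBYZERO (divide by zero)"),
-- ]
--
-- BFSR_BITS = [    # CFSR bits 8-15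
--     ( 8, "IBUSERR (instruction bus error)"),
--     ( 9, "PRECISERR (precise data bus error)"),
--     (10, "IMPRECISERR (imprecise data bus error)"),
--     (11, "UNSTKERR (stack unwind on exit)"),
--     (12, "STKERR (stack frame push on entry)"),
--     (13, "LSPERR (FP lazy state preservation)"),
--     (15, "BFARVALID (BFAR holds the faulting address)"),
-- ]
--
-- MMFSR_BITS = [   # CFSR bits 0-7
--     ( 0, "IACCVIOL (instruction-access violation)"),
--     ( 1, "DACCVIOL (data-access violation)"),
--     ( 3, "MUNSTKERR (stack unwind on exit)"),
--     ( 4, "MSTKERR (stack frame push on entry)"),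
--     ( 5, "MLSPERR (FP lazy state preservation)"),
--     ( 7, "MMARVALID (MMFAR holds the faulting address)"),
-- ]
--
-- def decode_bits(value, table):
--     """Return list of human-readable bit-name strings for the bits set
--     in `value` matching `table` entries (bit, label)."""
--     return [label for bit, label in table if (value >> bit) & 1]
--
-- def decode_cfsr(cfsr):
--     out = []
--     mmfsr = cfsr & 0xFF
--     bfsr  = (cfsr >> 8) & 0xFF
--     ufsr  = (cfsr >> 16) & 0xFFFF
--     if mmfsr: out += [f"MMFSR.{x}" for x in decode_bits(cfsr, MMFSR_BITS)]
--     if bfsr:  out += [f"BFSR.{x}"  for x in decode_bits(cfsr, BFSR_BITS)]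
--     if ufsr:  out += [f"UFSR.{x}"  for x in decode_bits(cfsr, UFSR_BITS)]
--     return out
-- ===== SOURCE B (Python) =====
-- COMBINED = [
--     (0,  "MMFSR.IACCVIOL (instruction-access violation)"),
--     (1,  "MMFSR.DACCVIOL (data-access violation)"),
--     (3,  "MMFSR.MUNSTKERR (stack unwind on exit)"),
--     (4,  "MMFSR.MSTKERR (stack frame push on entry)"),
--     (5,  "MMFSR.MLSPERR (FP lazy state preservation)"),
--     (7,  "MMFSR.MMARVALID (MMFAR holds the faulting address)"),
--     (8,  "BFSR.IBUSERR (instruction bus error)"),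
--     (9,  "BFSR.PRECISERR (precise data bus error)"),
--     (10, "BFSR.IMPRECISERR (imprecise data bus error)"),
--     (11, "BFSR.UNSTKERR (stack unwind on exit)"),
--     (12, "BFSR.STKERR (stack frame push on entry)"),
--     (13, "BFSR.LSPERR (FP lazy state preservation)"),
--     (15, "BFSR.BFARVALID (BFAR holds the faulting address)"),
--     (16, "UFSR.UNDEFINSTR (undefined instruction)"),
--     (17, "UFSR.INVSTATE (invalid EPSR.T or invalid IT)"),
--     (18, "UFSR.INVPC (invalid PC load by EXC_RETURN)"),
--     (19, "UFSR.NOCP (coprocessor disabled / not present)"),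
--     (24, "UFSR.UNALIGNED (unaligned access)"),
--     (25, "UFSR.DIVBYZERO (divide by zero)"),
-- ]
--
-- def decode_cfsr(cfsr):
--     return [name for bit, name in COMBINED if (cfsr >> bit) & 1]
-- ===== Notes on version B (the rewrite author's own statement) =====
-- stated objective: simpler
-- what changed: Replaces the three per-region masked passes with their guard checks by one flat pre-prefixed table scanned in a single comprehension; the region-byte guards are proved no-ops.
import Mathlib
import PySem

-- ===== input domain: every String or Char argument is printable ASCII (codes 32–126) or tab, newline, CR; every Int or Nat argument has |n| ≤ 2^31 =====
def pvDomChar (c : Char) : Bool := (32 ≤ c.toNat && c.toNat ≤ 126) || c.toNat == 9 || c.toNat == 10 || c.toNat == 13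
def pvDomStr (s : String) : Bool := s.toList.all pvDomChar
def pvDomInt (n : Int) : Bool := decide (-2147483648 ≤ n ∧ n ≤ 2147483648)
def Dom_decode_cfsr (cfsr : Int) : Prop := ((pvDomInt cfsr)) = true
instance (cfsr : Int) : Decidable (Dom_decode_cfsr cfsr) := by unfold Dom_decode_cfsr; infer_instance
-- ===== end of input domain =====

-- B replaces A's three per-region masked passes and guard checks by one flat pre-prefixed
-- table scanned in a single comprehension (the guards are proved to be no-ops): simpler.

-- ===== PORT A =====
def UFSR_BITS : List (Int × String) := [
  (16, "UNDEFINSTR (undefined instruction)"),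
  (17, "INVSTATE (invalid EPSR.T or invalid IT)"),
  (18, "INVPC (invalid PC load by EXC_RETURN)"),
  (19, "NOCP (coprocessor disabled / not present)"),
  (24, "UNALIGNED (unaligned access)"),
  (25, "DIVBYZERO (divide by zero)")]

def BFSR_BITS : List (Int × String) := [
  (8, "IBUSERR (instruction bus error)"),
  (9, "PRECISERR (precise data bus error)"),
  (10, "IMPRECISERR (imprecise data bus error)"),
  (11, "UNSTKERR (stack unwind on exit)"),
  (12, "STKERR (stack frame push on entry)"),
  (13, "LSPERR (FP lazy state preservation)"),
  (15, "BFARVALID (BFAR holds the faulting address)")]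

def MMFSR_BITS : List (Int × String) := [
  (0, "IACCVIOL (instruction-access violation)"),
  (1, "DACCVIOL (data-access violation)"),
  (3, "MUNSTKERR (stack unwind on exit)"),
  (4, "MSTKERR (stack frame push on entry)"),
  (5, "MLSPERR (FP lazy state preservation)"),
  (7, "MMARVALID (MMFAR holds the faulting address)")]

-- (value >> bit) & 1: Python '>> bit' is floor division by 2^bit and '& 1' is '% 2'
-- (exact for all ints, including negatives); bit entries are nonnegative literals, so .toNat is exact.
def decode_bits (value : Int) (table : List (Int × String)) : List String :=
  table.filterMap (fun p =>
    if PySem.Int.mod (PySem.Int.floordiv value (2 ^ p.1.toNat)) 2 ≠ 0 then some p.2 else none)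

-- 'cfsr & 0xFF' = mod cfsr 256 and '(cfsr >> k) & mask' = mod (floordiv cfsr 2^k) (mask+1):
-- exact Python semantics for every int, including negatives.
def decode_cfsr (cfsr : Int) : List String :=
  let out : List String := []
  let mmfsr := PySem.Int.mod cfsr 256
  let bfsr := PySem.Int.mod (PySem.Int.floordiv cfsr 256) 256
  let ufsr := PySem.Int.mod (PySem.Int.floordiv cfsr 65536) 65536
  let out := if mmfsr ≠ 0 then out ++ (decode_bits cfsr MMFSR_BITS).map (fun x => "MMFSR." ++ x) else out
  let out := if bfsr ≠ 0 then out ++ (decode_bits cfsr BFSR_BITS).map (fun x => "BFSR." ++ x) else out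
  let out := if ufsr ≠ 0 then out ++ (decode_bits cfsr UFSR_BITS).map (fun x => "UFSR." ++ x) else out
  out

-- ===== PORT B =====
def COMBINED : List (Int × String) := [
  (0,  "MMFSR.IACCVIOL (instruction-access violation)"),
  (1,  "MMFSR.DACCVIOL (data-access violation)"),
  (3,  "MMFSR.MUNSTKERR (stack unwind on exit)"),
  (4,  "MMFSR.MSTKERR (stack frame push on entry)"),
  (5,  "MMFSR.MLSPERR (FP lazy state preservation)"),
  (7,  "MMFSR.MMARVALID (MMFAR holds the faulting address)"),
  (8,  "BFSR.IBUSERR (instruction bus error)"),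
  (9,  "BFSR.PRECISERR (precise data bus error)"),
  (10, "BFSR.IMPRECISERR (imprecise data bus error)"),
  (11, "BFSR.UNSTKERR (stack unwind on exit)"),
  (12, "BFSR.STKERR (stack frame push on entry)"),
  (13, "BFSR.LSPERR (FP lazy state preservation)"),
  (15, "BFSR.BFARVALID (BFAR holds the faulting address)"),
  (16, "UFSR.UNDEFINSTR (undefined instruction)"),
  (17, "UFSR.INVSTATE (invalid EPSR.T or invalid IT)"),
  (18, "UFSR.INVPC (invalid PC load by EXC_RETURN)"),
  (19, "UFSR.NOCP (coprocessor disabled / not present)"),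
  (24, "UFSR.UNALIGNED (unaligned access)"),
  (25, "UFSR.DIVBYZERO (divide by zero)")]

def decode_cfsr_alt (cfsr : Int) : List String :=
  COMBINED.filterMap (fun p =>
    if PySem.Int.mod (PySem.Int.floordiv cfsr (2 ^ p.1.toNat)) 2 ≠ 0 then some p.2 else none)

-- ===== PRECONDITION & SPEC =====
def Spec_decode_cfsr (cfsr : Int) (out : List String) : Prop := out = decode_cfsr_alt cfsr
instance (cfsr : Int) (out : List String) : Decidable (Spec_decode_cfsr cfsr out) := by unfold Spec_decode_cfsr; infer_instance

-- ===== CLAIM (what is proved, stated in full; the proofs are below) =====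
def Claim_equal_decode_cfsr : Prop := ∀ (cfsr : Int), Dom_decode_cfsr cfsr → Spec_decode_cfsr cfsr (decode_cfsr cfsr)

-- ===== LEMMAS AND PROOFS =====

-- If y is divisible by q and 2*p divides q, then bit p of y (i.e. (y/p) % 2) is zero.
theorem bit_zero_of_mod {y p q : Int} (hp : p ≠ 0) (hdvd : 2 * p ∣ q) (h : y % q = 0) :
    y / p % 2 = 0 := by
  obtain ⟨t, rfl⟩ := hdvd.trans (Int.dvd_of_emod_eq_zero h)
  have hc : 2 * p * t / p = 2 * t := by
    rw [mul_comm 2 p, mul_assoc]; exact Int.mul_ediv_cancel_left _ hp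
  rw [hc]; simp [Int.mul_emod_right]

-- Region-byte guard is a no-op: a zero region byte kills every labelled bit of that region.
theorem region_bit_zero (cfsr B M p : Int) (hB : 0 < B) (hM : 0 < M) (hp : 0 < p)
    (hd : 2 * p ∣ M) (h : PySem.Int.mod (PySem.Int.floordiv cfsr B) M = 0) :
    PySem.Int.mod (PySem.Int.floordiv cfsr (B * p)) 2 = 0 := by
  rw [PySem.Int.mod_eq_emod_of_pos hM, PySem.Int.floordiv_eq_ediv_of_pos hB] at h
  rw [PySem.Int.mod_eq_emod_of_pos (by norm_num),
    PySem.Int.floordiv_eq_ediv_of_pos (by positivity),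
    ← Int.ediv_ediv_of_nonneg (le_of_lt hB)]
  exact bit_zero_of_mod (ne_of_gt hp) hd h

theorem mm_empty (cfsr : Int) (h : PySem.Int.mod cfsr 256 = 0) :
    decode_bits cfsr MMFSR_BITS = [] := by
  have h' : PySem.Int.mod (PySem.Int.floordiv cfsr 1) 256 = 0 := by
    rwa [PySem.Int.floordiv_eq_ediv_of_pos one_pos, Int.ediv_one]
  have t : ∀ p : Int, 0 < p → 2 * p ∣ 256 → PySem.Int.mod (PySem.Int.floordiv cfsr p) 2 = 0 := by
    intro p hp hd
    have := region_bit_zero cfsr 1 256 p one_pos (by norm_num) hp hd h'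
    rwa [one_mul] at this
  have g : ∀ q : Int, 0 < q → PySem.Int.mod (PySem.Int.floordiv cfsr q) 2 = 0 →
      ¬ (cfsr / q % 2 = 1) := by
    intro q hpos hq
    rw [PySem.Int.mod_eq_emod_of_pos (by norm_num),
      PySem.Int.floordiv_eq_ediv_of_pos hpos] at hq
    omega
  have g0 := g 1 (by norm_num) (t 1 (by norm_num) (by norm_num))
  rw [Int.ediv_one] at g0
  simp [decode_bits, MMFSR_BITS, g0,
    g 2 (by norm_num) (t 2 (by norm_num) (by norm_num)),
    g 8 (by norm_num) (t 8 (by norm_num) (by norm_num)),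
    g 16 (by norm_num) (t 16 (by norm_num) (by norm_num)),
    g 32 (by norm_num) (t 32 (by norm_num) (by norm_num)),
    g 128 (by norm_num) (t 128 (by norm_num) (by norm_num))]

theorem bf_empty (cfsr : Int) (h : PySem.Int.mod (PySem.Int.floordiv cfsr 256) 256 = 0) :
    decode_bits cfsr BFSR_BITS = [] := by
  have t : ∀ p : Int, 0 < p → 2 * p ∣ 256 →
      PySem.Int.mod (PySem.Int.floordiv cfsr (256 * p)) 2 = 0 := fun p hp hd =>
    region_bit_zero cfsr 256 256 p (by norm_num) (by norm_num) hp hd h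
  have g : ∀ q : Int, 0 < q → PySem.Int.mod (PySem.Int.floordiv cfsr (256 * q)) 2 = 0 →
      ¬ (cfsr / (256 * q) % 2 = 1) := by
    intro q hpos hq
    rw [PySem.Int.mod_eq_emod_of_pos (by norm_num),
      PySem.Int.floordiv_eq_ediv_of_pos (by positivity)] at hq
    omega
  have g8 := g 1 (by norm_num) (t 1 (by norm_num) (by norm_num));    norm_num at g8
  have g9 := g 2 (by norm_num) (t 2 (by norm_num) (by norm_num));    norm_num at g9
  have g10 := g 4 (by norm_num) (t 4 (by norm_num) (by norm_num));   norm_num at g10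
  have g11 := g 8 (by norm_num) (t 8 (by norm_num) (by norm_num));   norm_num at g11
  have g12 := g 16 (by norm_num) (t 16 (by norm_num) (by norm_num)); norm_num at g12
  have g13 := g 32 (by norm_num) (t 32 (by norm_num) (by norm_num)); norm_num at g13
  have g15 := g 128 (by norm_num) (t 128 (by norm_num) (by norm_num)); norm_num at g15
  simp [decode_bits, BFSR_BITS,
    g8, g9, g10, g11, g12, g13, g15]

theorem uf_empty (cfsr : Int) (h : PySem.Int.mod (PySem.Int.floordiv cfsr 65536) 65536 = 0) :
    decode_bits cfsr UFSR_BITS = [] := by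
  have t : ∀ p : Int, 0 < p → 2 * p ∣ 65536 →
      PySem.Int.mod (PySem.Int.floordiv cfsr (65536 * p)) 2 = 0 := fun p hp hd =>
    region_bit_zero cfsr 65536 65536 p (by norm_num) (by norm_num) hp hd h
  have g : ∀ q : Int, 0 < q → PySem.Int.mod (PySem.Int.floordiv cfsr (65536 * q)) 2 = 0 →
      ¬ (cfsr / (65536 * q) % 2 = 1) := by
    intro q hpos hq
    rw [PySem.Int.mod_eq_emod_of_pos (by norm_num),
      PySem.Int.floordiv_eq_ediv_of_pos (by positivity)] at hq
    omega
  have g16 := g 1 (by norm_num) (t 1 (by norm_num) (by norm_num));    norm_num at g16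
  have g17 := g 2 (by norm_num) (t 2 (by norm_num) (by norm_num));    norm_num at g17
  have g18 := g 4 (by norm_num) (t 4 (by norm_num) (by norm_num));    norm_num at g18
  have g19 := g 8 (by norm_num) (t 8 (by norm_num) (by norm_num));    norm_num at g19
  have g24 := g 256 (by norm_num) (t 256 (by norm_num) (by norm_num)); norm_num at g24
  have g25 := g 512 (by norm_num) (t 512 (by norm_num) (by norm_num)); norm_num at g25
  simp [decode_bits, UFSR_BITS,
    g16, g17, g18, g19, g24, g25]

theorem prefix_filterMap (value : Int) (pre : String) (tbl : List (Int × String)) :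
    List.filterMap (fun p =>
      if PySem.Int.mod (PySem.Int.floordiv value (2 ^ p.1.toNat)) 2 ≠ 0 then some p.2 else none)
      (tbl.map (fun p => (p.1, pre ++ p.2)))
    = (decode_bits value tbl).map (fun x => pre ++ x) := by
  induction tbl with
  | nil => simp [decode_bits]
  | cons a l ih =>
    by_cases hc : PySem.Int.mod (PySem.Int.floordiv value (2 ^ a.1.toNat)) 2 ≠ 0
    · simp only [decode_bits, List.map_cons, List.filterMap_cons, if_pos hc] at ih ⊢
      rw [ih]
    · simp only [decode_bits, List.map_cons, List.filterMap_cons, if_neg hc] at ih ⊢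
      rw [ih]

theorem combined_split :
    COMBINED = MMFSR_BITS.map (fun p => (p.1, "MMFSR." ++ p.2))
      ++ BFSR_BITS.map (fun p => (p.1, "BFSR." ++ p.2))
      ++ UFSR_BITS.map (fun p => (p.1, "UFSR." ++ p.2)) := by
  decide

theorem alt_split (cfsr : Int) :
    decode_cfsr_alt cfsr
    = (decode_bits cfsr MMFSR_BITS).map (fun x => "MMFSR." ++ x)
      ++ (decode_bits cfsr BFSR_BITS).map (fun x => "BFSR." ++ x)
      ++ (decode_bits cfsr UFSR_BITS).map (fun x => "UFSR." ++ x) := by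
  rw [decode_cfsr_alt, combined_split, List.filterMap_append, List.filterMap_append,
    prefix_filterMap, prefix_filterMap, prefix_filterMap]

theorem main_eq (cfsr : Int) : decode_cfsr cfsr = decode_cfsr_alt cfsr := by
  rw [alt_split]
  by_cases hm : PySem.Int.mod cfsr 256 = 0 <;>
    by_cases hb : PySem.Int.mod (PySem.Int.floordiv cfsr 256) 256 = 0 <;>
      by_cases hu : PySem.Int.mod (PySem.Int.floordiv cfsr 65536) 65536 = 0 <;>
    simp only [decode_cfsr, ne_eq, hm, hb, hu, not_true_eq_false,
      not_false_eq_true, ite_true, ite_false, List.nil_append]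
  · rw [mm_empty cfsr hm, bf_empty cfsr hb, uf_empty cfsr hu]; simp
  · rw [mm_empty cfsr hm, bf_empty cfsr hb]; simp
  · rw [mm_empty cfsr hm, uf_empty cfsr hu]; simp
  · rw [mm_empty cfsr hm]; simp
  · rw [bf_empty cfsr hb, uf_empty cfsr hu]; simp
  · rw [bf_empty cfsr hb]; simp
  · rw [uf_empty cfsr hu]; simp

-- ===== VERDICT (by name: the statement is the Claim_ definition above) =====
theorem decode_cfsr_spec : Claim_equal_decode_cfsr := by
  intro cfsr _
  unfold Spec_decode_cfsr
  exact main_eq cfsr
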